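-- pv_equiv track=rewrite | github.com/indrajeet-77/Five-Months | 7.List/Week3_A4/A4.py | sm_evn
-- ===== SOURCE A (Python) =====
-- def sm_evn(my_list: list)->int:
--     l2=[]
--     for i in my_list:
--             if i%2==0:
--                 l2.append(i)
--     small=l2[0]
--     for i in l2:
--         if i< small:
--             small=i
--     return small
-- ===== SOURCE B (Python) =====
-- def sm_evn(my_list: list)->int:
--     evens = sorted(i for i in my_list if i % 2 == 0)
--     return evens[0]
-- ===== Notes on version B (the rewrite author's own statement) =====
-- stated objective: simpler
-- what changed: B collects the evens with a comprehension and finds the minimum by sorting and taking the first element, instead of A's explicit append loop followed by a linear min-scan; indexing the sorted list keeps the IndexError when no evens exist.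
-- outside the precondition, e.g. on sm_evn([1, 3]): A raises IndexError, B raises IndexError
import Mathlib
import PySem

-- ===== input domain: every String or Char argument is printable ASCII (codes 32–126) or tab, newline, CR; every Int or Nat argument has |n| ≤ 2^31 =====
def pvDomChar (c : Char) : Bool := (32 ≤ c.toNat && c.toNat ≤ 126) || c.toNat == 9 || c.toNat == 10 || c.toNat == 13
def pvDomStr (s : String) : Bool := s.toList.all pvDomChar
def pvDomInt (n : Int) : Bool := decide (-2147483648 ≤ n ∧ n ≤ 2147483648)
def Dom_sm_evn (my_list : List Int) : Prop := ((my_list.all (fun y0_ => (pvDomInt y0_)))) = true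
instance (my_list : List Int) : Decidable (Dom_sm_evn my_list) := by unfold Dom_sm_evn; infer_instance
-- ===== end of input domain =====

-- B replaces A's append-loop + linear min-scan by filter-then-sort-and-take-head (simpler; same return values, IndexError kept when no evens).
-- ===== PORT A =====
def sm_evn (my_list : List Int) : Int :=
  let l2 := my_list.foldl (fun acc i => if PySem.Int.mod i 2 == 0 then acc ++ [i] else acc) []
  match PySem.List.pyGet? l2 0 with
  | none => 0  -- IndexError: excluded by Pre_sm_evn
  | some small => l2.foldl (fun s i => if i < s then i else s) small

-- ===== PORT B =====
def sm_evn_alt (my_list : List Int) : Int :=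
  let evens := PySem.List.sorted (my_list.filter (fun i => PySem.Int.mod i 2 == 0)) (fun x => x) false
  match PySem.List.pyGet? evens 0 with
  | none => 0  -- IndexError: excluded by Pre_sm_evn
  | some v => v

-- ===== PRECONDITION & SPEC =====
-- Pre_ excludes exactly the lists with no even element, on which A (and B) raise IndexError.
def Pre_sm_evn (my_list : List Int) : Prop :=
  my_list.filter (fun i => PySem.Int.mod i 2 == 0) ≠ []
instance (my_list : List Int) : Decidable (Pre_sm_evn my_list) := by unfold Pre_sm_evn; infer_instance
def pvWitness_sm_evn : List Int := [3, 8, 2, 5]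
def Spec_sm_evn (my_list : List Int) (out : Int) : Prop := out = sm_evn_alt my_list
instance (my_list : List Int) (out : Int) : Decidable (Spec_sm_evn my_list out) := by unfold Spec_sm_evn; infer_instance

-- ===== CLAIM (what is proved, stated in full; the proofs are below) =====
def Claim_equal_sm_evn : Prop := ∀ (my_list : List Int), Dom_sm_evn my_list → Pre_sm_evn my_list → Spec_sm_evn my_list (sm_evn my_list)

-- ===== LEMMAS AND PROOFS =====

-- A's append loop builds exactly the filter of the list.
theorem sm_evn_foldl_filter (p : Int → Bool) (my_list acc : List Int) :
    my_list.foldl (fun acc i => if p i then acc ++ [i] else acc) acc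
      = acc ++ my_list.filter p := by
  induction my_list generalizing acc with
  | nil => simp
  | cons x xs ih =>
    by_cases h : p x <;> simp [List.foldl, h, ih]

-- The min-scan's result is a member of the start value together with the list.
theorem sm_evn_scan_mem (l : List Int) (a : Int) :
    l.foldl (fun s i => if i < s then i else s) a ∈ a :: l := by
  induction l generalizing a with
  | nil => simp
  | cons x xs ih =>
    simp only [List.foldl]
    by_cases h : x < a
    · rw [if_pos h]
      rcases List.mem_cons.mp (ih x) with h2 | h2 <;> simp [h2]
    · rw [if_neg h]
      rcases List.mem_cons.mp (ih a) with h2 | h2 <;> simp [h2]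

-- The min-scan's result is ≤ the start value and every element.
theorem sm_evn_scan_le (l : List Int) (a : Int) :
    ∀ y ∈ a :: l, l.foldl (fun s i => if i < s then i else s) a ≤ y := by
  induction l generalizing a with
  | nil => intro y hy; simp at hy; simp [hy]
  | cons x xs ih =>
    intro y hy
    simp only [List.foldl]
    by_cases h : x < a
    · rw [if_pos h]
      rcases List.mem_cons.mp hy with h2 | hy2
      · have hx := ih x x (List.mem_cons_self ..)
        omega
      · exact ih x y hy2
    · rw [if_neg h]
      rcases List.mem_cons.mp hy with h2 | hy2
      · have ha := ih a a (List.mem_cons_self ..)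
        omega
      · rcases List.mem_cons.mp hy2 with h3 | hy3
        · have ha := ih a a (List.mem_cons_self ..)
          omega
        · exact ih a y (List.mem_cons_of_mem _ hy3)

-- ===== VERDICT (by name: the statement is the Claim_ definition above) =====
theorem sm_evn_spec : Claim_equal_sm_evn := by
  intro my_list _ hpre
  unfold Spec_sm_evn sm_evn sm_evn_alt
  simp only [sm_evn_foldl_filter, List.nil_append]
  set f := my_list.filter (fun i => PySem.Int.mod i 2 == 0) with hf
  obtain ⟨a, t, hft⟩ := List.exists_cons_of_ne_nil hpre
  have hperm := PySem.List.sorted_perm (xs := f) (key := fun x => x) (rev := false)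
  have hsnil : PySem.List.sorted f (fun x => x) false ≠ [] := by
    intro h
    exact hpre ((h ▸ hperm).symm.eq_nil)
  obtain ⟨m, s, hms⟩ := List.exists_cons_of_ne_nil hsnil
  have hA : PySem.List.pyGet? f 0 = some a := by
    rw [hf, hft]; simp [PySem.List.pyGet?, PySem.List.pyIdx?]
  have hB : PySem.List.pyGet? (PySem.List.sorted f (fun x => x) false) 0 = some m := by
    simp [hms, PySem.List.pyGet?, PySem.List.pyIdx?]
  rw [hA, hB]
  -- A's value: the min-scan over f starting at its head
  have hmem : f.foldl (fun s i => if i < s then i else s) a ∈ f := by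
    rcases List.mem_cons.mp (sm_evn_scan_mem f a) with h | h
    · rw [h, hf, hft]; exact List.mem_cons_self ..
    · exact h
  have hle : ∀ y ∈ f, f.foldl (fun s i => if i < s then i else s) a ≤ y := by
    intro y hy
    exact sm_evn_scan_le f a y (List.mem_cons_of_mem _ hy)
  -- B's value: head of the sorted list, a member ≤ every element
  have hmmem : m ∈ f := hperm.mem_iff.mp (hms ▸ List.mem_cons_self ..)
  have hmle : ∀ y ∈ f, m ≤ y :=
    PySem.List.key_head_sorted_le (xs := f) (key := fun x => x) hms
  exact le_antisymm (hle m hmmem) (hmle _ hmem)
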